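-- pv_equiv track=rewrite | github.com/Escouflenfer/combinatorials-app | modules/functions/functions_shared.py | detect_measurement
-- ===== SOURCE A (Python) =====
-- def detect_measurement(filename_list: list):
--     """
--        Scan a folder to determine which type of measurement it is
--
--        Parameters:
--            filename_list (list): list containing all filenames to parse
--
--        Returns:
--            version (str): detected measurement type
--        """
--     measurement_dict = {
--         "Smartlab": ["ras"],
--         "MOKE": ["log"],
--         "EDX": ["spx"],
--         "PROFIL": ["asc2d"],
--         "ESRF": ["h5"],
--         "XRD results": ["lst"]
--     }
--
--     for measurement_type, file_type in measurement_dict.items():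
--         for filename in filename_list:
--             if filename.startswith('.'):  # Skip hidden files
--                 continue
--             if filename.split('.')[-1] in file_type: # Check extensions for correspondence to the dictionary spec
--                 depth = filename.count('/')
--                 return measurement_type, depth
--     return None
-- ===== SOURCE B (Python) =====
-- def detect_measurement(filename_list: list):
--     measurement_dict = {
--         "Smartlab": ["ras"],
--         "MOKE": ["log"],
--         "EDX": ["spx"],
--         "PROFIL": ["asc2d"],
--         "ESRF": ["h5"],
--         "XRD results": ["lst"]
--     }
--     # reverse map: extension -> measurement type
--     ext_to_type = {ext: mt for mt, exts in measurement_dict.items() for ext in exts}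
--     # one pass: record the depth of the FIRST matching file per measurement type
--     first_depth = {}
--     for filename in filename_list:
--         if filename.startswith('.'):
--             continue
--         mt = ext_to_type.get(filename.split('.')[-1])
--         if mt is not None and mt not in first_depth:
--             first_depth[mt] = filename.count('/')
--     # pick the winner by the dictionary's priority order
--     for mt in measurement_dict:
--         if mt in first_depth:
--             return mt, first_depth[mt]
--     return None
-- ===== Notes on version B (the rewrite author's own statement) =====
-- stated objective: faster
-- what changed: Replaces A's per-type rescans of the file list with a reverse ext->type map, a single pass over the filenames recording the first-seen depth per type, and a final pick in the dictionary's priority order.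
import Mathlib
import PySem

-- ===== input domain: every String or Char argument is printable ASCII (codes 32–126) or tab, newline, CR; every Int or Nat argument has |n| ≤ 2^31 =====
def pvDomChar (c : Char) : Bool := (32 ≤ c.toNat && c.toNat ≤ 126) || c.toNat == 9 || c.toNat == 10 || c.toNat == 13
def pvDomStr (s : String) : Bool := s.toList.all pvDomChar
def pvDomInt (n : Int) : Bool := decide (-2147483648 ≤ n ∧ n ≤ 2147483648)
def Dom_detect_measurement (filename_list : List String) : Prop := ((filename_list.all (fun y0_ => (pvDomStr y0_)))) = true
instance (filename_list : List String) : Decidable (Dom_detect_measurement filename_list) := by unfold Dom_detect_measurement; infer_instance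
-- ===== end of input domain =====

-- B replaces A's per-type rescans of the file list with a reverse ext->type map, one pass
-- recording the first-seen depth per type, and a final pick in priority order (objective: alternative).

-- filename.split('.')[-1]  (shared by both Pythons; '.' ≠ "" so split? is always some)
def pvExt? (f : String) : Option String :=
  (PySem.Str.split? f ".").bind (fun parts => PySem.List.pyGet? parts (-1))

-- ===== PORT A =====
def pvMeasItemsA : List (String × List String) :=
  [("Smartlab", ["ras"]), ("MOKE", ["log"]), ("EDX", ["spx"]),
   ("PROFIL", ["asc2d"]), ("ESRF", ["h5"]), ("XRD results", ["lst"])]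

-- inner 'for filename in filename_list' loop of A
def pvScanA (mt : String) (ft : List String) : List String → Option (String × Int)
  | [] => none
  | f :: rest =>
    if PySem.Str.startswith f "." then pvScanA mt ft rest
    else
      match pvExt? f with
      | some e => if e ∈ ft then some (mt, (PySem.Str.count f "/" : Int)) else pvScanA mt ft rest
      | none => pvScanA mt ft rest

-- outer 'for measurement_type, file_type in measurement_dict.items()' loop of A
def pvOuterA (fs : List String) : List (String × List String) → Option (String × Int)
  | [] => none
  | (mt, ft) :: rest =>
    match pvScanA mt ft fs with
    | some r => some r
    | none => pvOuterA fs rest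

def detect_measurement (filename_list : List String) : Option (String × Int) :=
  pvOuterA filename_list pvMeasItemsA

-- ===== PORT B =====
def pvMeasDictB : PySem.Dict String (List String) :=
  PySem.Dict.ofList
    [("Smartlab", ["ras"]), ("MOKE", ["log"]), ("EDX", ["spx"]),
     ("PROFIL", ["asc2d"]), ("ESRF", ["h5"]), ("XRD results", ["lst"])]

-- ext_to_type = {ext: mt for mt, exts in measurement_dict.items() for ext in exts}
def pvExtToType : PySem.Dict String String :=
  pvMeasDictB.items.foldl (fun d p => p.2.foldl (fun d e => d.insert e p.1) d) PySem.Dict.empty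

-- one pass building first_depth
def pvCollectB (filename_list : List String) : PySem.Dict String Int :=
  filename_list.foldl
    (fun d f =>
      if PySem.Str.startswith f "." then d
      else
        match pvExt? f with
        | none => d
        | some e =>
          match pvExtToType.get? e with
          | none => d
          | some mt =>
            if (d.get? mt).isSome then d else d.insert mt (PySem.Str.count f "/" : Int))
    PySem.Dict.empty

-- 'for mt in measurement_dict: if mt in first_depth: return mt, first_depth[mt]'
def pvPickB (fd : PySem.Dict String Int) : List String → Option (String × Int)
  | [] => none
  | mt :: rest =>
    match fd.get? mt with
    | some v => some (mt, v)
    | none => pvPickB fd rest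

def detect_measurement_alt (filename_list : List String) : Option (String × Int) :=
  pvPickB (pvCollectB filename_list) pvMeasDictB.keys

-- ===== PRECONDITION & SPEC =====
def Spec_detect_measurement (filename_list : List String) (out : Option (String × Int)) : Prop := out = detect_measurement_alt filename_list
instance (filename_list : List String) (out : Option (String × Int)) : Decidable (Spec_detect_measurement filename_list out) := by unfold Spec_detect_measurement; infer_instance

-- ===== CLAIM (what is proved, stated in full; the proofs are below) =====
def Claim_equal_detect_measurement : Prop := ∀ (filename_list : List String), Dom_detect_measurement filename_list → Spec_detect_measurement filename_list (detect_measurement filename_list)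

-- ===== LEMMAS AND PROOFS =====

-- first non-hidden file with extension e
def pvFirst (e : String) (fs : List String) : Option String :=
  fs.find? (fun f => !PySem.Str.startswith f "." && pvExt? f == some e)

def pvDep (f : String) : Int := (PySem.Str.count f "/" : Int)

theorem pvFirst_cons (e f : String) (rest : List String) :
    pvFirst e (f :: rest) =
      if (!PySem.Str.startswith f "." && pvExt? f == some e) = true then some f
      else pvFirst e rest := by
  cases h : (!PySem.Str.startswith f "." && pvExt? f == some e) <;>
    simp only [pvFirst, List.find?_cons, h] <;> simp

theorem pvScanA_eq (mt e : String) (fs : List String) :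
    pvScanA mt [e] fs = (pvFirst e fs).map (fun f => (mt, pvDep f)) := by
  induction fs with
  | nil => rfl
  | cons f rest ih =>
    rw [pvScanA, pvFirst_cons]
    cases hs : PySem.Chars.startswith f.toList ['.'] with
    | true => simp [hs, ih]
    | false =>
      cases hx : pvExt? f with
      | none => simp [hs, hx, ih]
      | some x =>
        by_cases hxe : x = e
        · subst hxe; simp [hs, hx, pvDep]
        · simp [hs, hx, hxe, ih]

set_option maxRecDepth 8192 in
theorem pvExtToType_get (x : String) :
    pvExtToType.get? x =
      if "ras" = x then some "Smartlab" else if "log" = x then some "MOKE"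
      else if "spx" = x then some "EDX" else if "asc2d" = x then some "PROFIL"
      else if "h5" = x then some "ESRF" else if "lst" = x then some "XRD results" else none := by
  have h : pvExtToType = PySem.Dict.mk
      [("ras", "Smartlab"), ("log", "MOKE"), ("spx", "EDX"),
       ("asc2d", "PROFIL"), ("h5", "ESRF"), ("lst", "XRD results")] := by decide
  rw [h]
  simp only [PySem.Dict.get?_mk_cons, beq_iff_eq]
  rfl

def pvStepB (d : PySem.Dict String Int) (f : String) : PySem.Dict String Int :=
  if PySem.Str.startswith f "." then d
  else
    match pvExt? f with
    | none => d
    | some e =>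
      match pvExtToType.get? e with
      | none => d
      | some mt =>
        if (d.get? mt).isSome then d else d.insert mt (PySem.Str.count f "/" : Int)

theorem pvCollectB_eq (fs : List String) :
    pvCollectB fs = fs.foldl pvStepB PySem.Dict.empty := rfl

theorem pvCollectB_get (mt e : String)
    (H : ∀ x, pvExtToType.get? x = some mt ↔ x = e) (fs : List String) :
    ∀ d : PySem.Dict String Int,
      (fs.foldl pvStepB d).get? mt = (d.get? mt).or ((pvFirst e fs).map pvDep) := by
  induction fs with
  | nil => intro d; simp [pvFirst]
  | cons f rest ih =>
    intro d
    rw [List.foldl_cons, ih, pvFirst_cons]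
    cases hs : PySem.Chars.startswith f.toList ['.'] with
    | true => simp [pvStepB, hs]
    | false =>
      cases hx : pvExt? f with
      | none => simp [pvStepB, hs, hx]
      | some x =>
        by_cases hxe : x = e
        · subst hxe
          have hg : pvExtToType.get? x = some mt := (H x).mpr rfl
          cases hdm : d.get? mt with
          | some v => simp [pvStepB, hs, hx, hg, hdm]
          | none =>
            simp [pvStepB, hs, hx, hg, hdm, PySem.Dict.get?_insert_self, pvDep]
        · cases hg : pvExtToType.get? x with
          | none => simp [pvStepB, hs, hx, hg, hxe]
          | some mt' =>
            have hne : mt ≠ mt' := fun hc => hxe ((H x).mp (hc ▸ hg))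
            cases hdm : (d.get? mt').isSome with
            | true => simp [pvStepB, hs, hx, hg, hxe, hdm]
            | false =>
              simp [pvStepB, hs, hx, hg, hxe, hdm,
                PySem.Dict.get?_insert_of_ne _ _ hne]

theorem pvCollectB_get' (mt e : String)
    (H : ∀ x, pvExtToType.get? x = some mt ↔ x = e) (fs : List String) :
    (pvCollectB fs).get? mt = (pvFirst e fs).map pvDep := by
  rw [pvCollectB_eq, pvCollectB_get mt e H fs PySem.Dict.empty]
  simp [PySem.Dict.get?_empty]

theorem detect_measurement_spec : Claim_equal_detect_measurement := by
  intro fs _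
  unfold Spec_detect_measurement
  have hH : ∀ mt e : String,
      (mt, e) ∈ [("Smartlab", "ras"), ("MOKE", "log"), ("EDX", "spx"),
        ("PROFIL", "asc2d"), ("ESRF", "h5"), ("XRD results", "lst")] →
      ∀ x, pvExtToType.get? x = some mt ↔ x = e := by
    intro mt e hmem x
    rw [pvExtToType_get]
    fin_cases hmem <;> split_ifs <;> subst_eqs <;> simp_all [eq_comm]
  have hS := pvCollectB_get' _ _ (hH "Smartlab" "ras" (by simp)) fs
  have hM := pvCollectB_get' _ _ (hH "MOKE" "log" (by simp)) fs
  have hE := pvCollectB_get' _ _ (hH "EDX" "spx" (by simp)) fs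
  have hP := pvCollectB_get' _ _ (hH "PROFIL" "asc2d" (by simp)) fs
  have hR := pvCollectB_get' _ _ (hH "ESRF" "h5" (by simp)) fs
  have hX := pvCollectB_get' _ _ (hH "XRD results" "lst" (by simp)) fs
  have hkeys : pvMeasDictB.keys =
      ["Smartlab", "MOKE", "EDX", "PROFIL", "ESRF", "XRD results"] := by decide
  unfold detect_measurement detect_measurement_alt pvMeasItemsA
  rw [hkeys]
  simp only [pvOuterA, pvPickB, hS, hM, hE, hP, hR, hX,
    pvScanA_eq "Smartlab" "ras", pvScanA_eq "MOKE" "log", pvScanA_eq "EDX" "spx",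
    pvScanA_eq "PROFIL" "asc2d", pvScanA_eq "ESRF" "h5", pvScanA_eq "XRD results" "lst"]
  cases pvFirst "ras" fs <;> cases pvFirst "log" fs <;> cases pvFirst "spx" fs <;>
    cases pvFirst "asc2d" fs <;> cases pvFirst "h5" fs <;> cases pvFirst "lst" fs <;> rfl
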